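-- pv_equiv track=rewrite | github.com/fhossain75/CS103-UAB | homework/HW3/hw3_19fa103.py | hurray
-- ===== SOURCE A (Python) =====
-- def hurray (n):
--     """A string that reveals the structure of the powers of 2.
--        See writeup for details.
--
--     >>> hurray (7)
--     0hurrayhurray3hurray567
--
--     Params: n (int) n >= 0
--     Returns: (str) string of integers 0 through n, inclusive, with every power
--                    of 2 replaced by the string 'hurray'
--     """
--     powersOf2 = []
--     start = ""
--     for x in range(n+1):
--         powersOf2.append(2**x)
--     for x in range(n+1):
--         if x in powersOf2:
--             start+="hurray"
--         else:
--             start+=str(x)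
--     return start
-- ===== SOURCE B (Python) =====
-- def hurray(n):
--     # One pass with a running power-of-2 pointer: no powers list, no membership scan.
--     parts = []
--     p = 1
--     for x in range(n + 1):
--         if x == p:
--             parts.append("hurray")
--             p *= 2
--         else:
--             parts.append(str(x))
--     return "".join(parts)
-- ===== Notes on version B (the rewrite author's own statement) =====
-- stated objective: faster
-- what changed: Instead of materialising the list [2**0 .. 2**n] of huge integers and doing a per-element membership scan over it, B keeps a single running power-of-2 pointer that it compares to x and doubles on a hit, joining the pieces at the end.
import Mathlib
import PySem

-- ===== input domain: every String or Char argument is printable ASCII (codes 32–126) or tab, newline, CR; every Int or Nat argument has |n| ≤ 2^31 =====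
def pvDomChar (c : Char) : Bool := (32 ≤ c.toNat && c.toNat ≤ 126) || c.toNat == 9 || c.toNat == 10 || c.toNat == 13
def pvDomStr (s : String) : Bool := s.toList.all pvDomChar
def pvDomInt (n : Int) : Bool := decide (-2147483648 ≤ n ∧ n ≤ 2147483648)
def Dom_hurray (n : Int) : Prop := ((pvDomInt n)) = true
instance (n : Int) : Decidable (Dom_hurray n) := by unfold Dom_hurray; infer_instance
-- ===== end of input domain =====

-- B replaces A's powers-of-2 list and per-element membership scan by a single running
-- power-of-2 pointer that doubles on each hit (objective: faster, O(n) vs O(n^2)).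

-- ===== PORT A =====
def hurray (n : Int) : String :=
  let powersOf2 : List Int :=
    (PySem.List.pyRange 0 (n + 1) 1).foldl (fun acc x => acc ++ [(2 : Int) ^ x.toNat]) []
  (PySem.List.pyRange 0 (n + 1) 1).foldl
    (fun start x => if x ∈ powersOf2 then start ++ "hurray" else start ++ PySem.Int.toStr x) ""

-- ===== PORT B =====
def hurray_alt (n : Int) : String :=
  let st :=
    (PySem.List.pyRange 0 (n + 1) 1).foldl
      (fun (st : List String × Int) x =>
        if x = st.2 then (st.1 ++ ["hurray"], st.2 * 2) else (st.1 ++ [PySem.Int.toStr x], st.2))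
      ([], 1)
  PySem.Str.join "" st.1

-- ===== PRECONDITION & SPEC =====
def Spec_hurray (n : Int) (out : String) : Prop := out = hurray_alt n
instance (n : Int) (out : String) : Decidable (Spec_hurray n out) := by unfold Spec_hurray; infer_instance

-- ===== CLAIM (what is proved, stated in full; the proofs are below) =====
def Claim_equal_hurray : Prop := ∀ (n : Int), Dom_hurray n → Spec_hurray n (hurray n)

-- ===== LEMMAS AND PROOFS =====

/-- `x` is an integer power of two. -/
def IsPow2 (x : Int) : Prop := ∃ k : Nat, x = (2 : Int) ^ k

/-- Proof-side element function (noncomputable; used only in lemmas). -/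
noncomputable def gPow (x : Int) : String :=
  @ite _ (IsPow2 x) (Classical.propDecidable _) "hurray" (PySem.Int.toStr x)

theorem isPow2_pos {x : Int} (h : IsPow2 x) : 1 ≤ x := by
  obtain ⟨k, rfl⟩ := h; exact one_le_pow₀ (by norm_num)

theorem isPow2_between {a p : Int} (ha : IsPow2 a) (hp : IsPow2 p)
    (h1 : a ≤ p) (h2 : p < 2 * a) : p = a := by
  obtain ⟨j, rfl⟩ := ha
  obtain ⟨k, rfl⟩ := hp
  have hjk : j ≤ k := (pow_le_pow_iff_right₀ (by norm_num : (1:Int) < 2)).mp h1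
  have h2' : (2:Int) ^ k < 2 ^ (j + 1) := by rw [pow_succ]; linarith
  have hkj : k < j + 1 := (pow_lt_pow_iff_right₀ (by norm_num : (1:Int) < 2)).mp h2'
  have : k = j := by omega
  rw [this]

/-- B's fold over `range(m+1)` produces exactly the `gPow` pieces, with a power-of-2
    pointer strictly between `m` and `2m+2`. -/
theorem bfold_char (m : Nat) :
    ∃ p : Int,
      (PySem.List.pyRange 0 ((m : Int) + 1) 1).foldl
          (fun (st : List String × Int) x =>
            if x = st.2 then (st.1 ++ ["hurray"], st.2 * 2) else (st.1 ++ [PySem.Int.toStr x], st.2))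
          ([], 1)
        = ((PySem.List.pyRange 0 ((m : Int) + 1) 1).map gPow, p)
      ∧ IsPow2 p ∧ (m : Int) < p ∧ p < 2 * m + 2 := by
  induction m with
  | zero =>
    refine ⟨1, ?_, ⟨0, by norm_num⟩, by norm_num, by norm_num⟩
    have h0 : PySem.List.pyRange 0 ((0:Nat) + 1) 1 = [(0:Int)] := by
      simpa using PySem.List.pyRange_one_singleton 0
    rw [h0]
    have hnp : ¬ IsPow2 (0 : Int) := fun h => by have := isPow2_pos h; omega
    simp [gPow, List.foldl, if_neg hnp]
  | succ m ih =>
    obtain ⟨p, heq, hpow, hlo, hhi⟩ := ih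
    have hcast : ((m + 1 : Nat) : Int) + 1 = ((m : Int) + 1) + 1 := by push_cast; ring
    have hsplit : PySem.List.pyRange 0 (((m + 1 : Nat) : Int) + 1) 1
        = PySem.List.pyRange 0 ((m : Int) + 1) 1 ++ [(m : Int) + 1] := by
      rw [hcast]; exact PySem.List.pyRange_one_succ_right (by positivity)
    rw [hsplit, List.foldl_append, heq, List.map_append]
    by_cases hP : IsPow2 ((m : Int) + 1)
    · have hpe : p = (m : Int) + 1 :=
        isPow2_between hP hpow (by omega) (by omega)
      refine ⟨p * 2, ?_, ?_, by push_cast; omega, by push_cast at hhi ⊢; omega⟩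
      · simp [List.foldl, hpe, gPow, if_pos hP]
      · obtain ⟨k, rfl⟩ := hpow; exact ⟨k + 1, by ring⟩
    · have hne : (m : Int) + 1 ≠ p := fun h => hP (h ▸ hpow)
      refine ⟨p, ?_, hpow, by push_cast; omega, by push_cast at hhi ⊢; omega⟩
      simp only [List.foldl, List.map, if_neg hne, gPow, if_neg hP]

theorem join_empty (parts : List (List Char)) :
    PySem.Chars.join [] parts = parts.flatten := by
  induction parts with
  | nil => rfl
  | cons a l ih =>
    cases l with
    | nil => simp [PySem.Chars.join, List.intercalate]
    | cons b t => rw [PySem.Chars.join_cons_cons, ih]; simp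

theorem strfold_toList (f : Int → String) (xs : List Int) (s : String) :
    (xs.foldl (fun acc x => acc ++ f x) s).toList
      = s.toList ++ (xs.map (fun x => (f x).toList)).flatten := by
  induction xs generalizing s with
  | nil => simp
  | cons a l ih => simp [List.foldl, ih, String.toList_append]

theorem mem_powers (n x : Int) (hx0 : 0 ≤ x) (hx : x < n + 1) :
    x ∈ (PySem.List.pyRange 0 (n + 1) 1).map (fun y => (2 : Int) ^ y.toNat) ↔ IsPow2 x := by
  constructor
  · intro h
    obtain ⟨y, _, rfl⟩ := List.mem_map.mp h
    exact ⟨y.toNat, rfl⟩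
  · rintro ⟨k, rfl⟩
    refine List.mem_map.mpr ⟨(k : Int), PySem.List.mem_pyRange_one.mpr ⟨by positivity, ?_⟩, by simp⟩
    have hk : (k : Int) < 2 ^ k := by exact_mod_cast (Nat.lt_two_pow_self : k < 2 ^ k)
    omega

-- ===== VERDICT (by name: the statement is the Claim_ definition above) =====
theorem hurray_spec : Claim_equal_hurray := by
  intro n _
  unfold Spec_hurray hurray hurray_alt
  by_cases hn : n + 1 ≤ 0
  · rw [PySem.List.pyRange_one_eq_nil hn]
    apply String.toList_inj.mp
    simp [List.foldl, PySem.Str.toList_join]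
  · rw [not_le] at hn
    have hnn : ((n.toNat : Nat) : Int) = n := Int.toNat_of_nonneg (by omega)
    obtain ⟨p, heq, -, -, -⟩ := bfold_char n.toNat
    rw [hnn] at heq
    rw [heq]
    have hpw : (PySem.List.pyRange 0 (n + 1) 1).foldl (fun acc x => acc ++ [(2 : Int) ^ x.toNat]) ([] : List Int)
        = (PySem.List.pyRange 0 (n + 1) 1).map (fun y => (2 : Int) ^ y.toNat) := by
      simpa using PySem.List.foldl_append_singleton_eq_map (fun x : Int => (2 : Int) ^ x.toNat)
        (PySem.List.pyRange 0 (n + 1) 1) []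
    rw [hpw]
    have hcong : (PySem.List.pyRange 0 (n + 1) 1).foldl
        (fun start x => if x ∈ (PySem.List.pyRange 0 (n + 1) 1).map (fun y => (2 : Int) ^ y.toNat)
            then start ++ "hurray" else start ++ PySem.Int.toStr x) ""
        = (PySem.List.pyRange 0 (n + 1) 1).foldl (fun acc x => acc ++ gPow x) "" := by
      apply PySem.List.foldl_congr_mem
      intro acc x hxmem
      obtain ⟨hx0, hx1⟩ := PySem.List.mem_pyRange_one.mp hxmem
      by_cases hP : IsPow2 x
      · rw [if_pos ((mem_powers n x hx0 hx1).mpr hP)]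
        simp [gPow, if_pos hP]
      · rw [if_neg (fun h => hP ((mem_powers n x hx0 hx1).mp h))]
        simp [gPow, if_neg hP]
    rw [hcong]
    apply String.toList_inj.mp
    rw [strfold_toList, PySem.Str.toList_join]
    simp [join_empty, List.map_map, Function.comp_def]
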